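-- pv_equiv track=rewrite | github.com/rahul9852-dot/Data-Structure-and-Algorithms | DSA/practise.py | angram_sol
-- ===== SOURCE A (Python) =====
-- def angram_sol(s1,s2):
--     alist = list(s2)
--     pos1=0
--     still_ok=True
--     while pos1<len(s1) and still_ok:
--         pos2=0
--         found=False
--         while pos2<len(alist) and not found:
--             if s1[pos1]==alist[pos2]:
--                 found=True
--             else:
--                 pos2=pos2+1
--         if found:
--             alist[pos2]=None
--         else:
--             still_ok=False
--         pos1+=1
--     return still_ok
-- ===== SOURCE B (Python) =====
-- def angram_sol(s1, s2):
--     cnt = {}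
--     for c in s2:
--         cnt[c] = cnt.get(c, 0) + 1
--     for c in s1:
--         if cnt.get(c, 0) == 0:
--             return False
--         cnt[c] = cnt[c] - 1
--     return True
-- ===== Notes on version B (the rewrite author's own statement) =====
-- stated objective: faster
-- what changed: Replaces A's per-character linear rescan of a mutable copy of s2 with a character-count dictionary built once over s2 and decremented while scanning s1.
import Mathlib
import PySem

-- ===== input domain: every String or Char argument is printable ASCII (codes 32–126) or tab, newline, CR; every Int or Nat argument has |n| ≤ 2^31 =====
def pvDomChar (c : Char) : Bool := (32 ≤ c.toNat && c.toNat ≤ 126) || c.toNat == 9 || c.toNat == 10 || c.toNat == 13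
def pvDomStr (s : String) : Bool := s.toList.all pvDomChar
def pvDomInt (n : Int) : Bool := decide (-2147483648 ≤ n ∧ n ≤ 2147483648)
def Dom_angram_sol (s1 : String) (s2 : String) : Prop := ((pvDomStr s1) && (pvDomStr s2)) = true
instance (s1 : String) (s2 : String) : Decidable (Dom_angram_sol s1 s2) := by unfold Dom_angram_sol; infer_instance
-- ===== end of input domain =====

-- B replaces A's quadratic per-char rescan of s2 by a single character-count
-- dictionary built once over s2 and decremented over s1 (objective: faster).

-- ===== PORT A =====
-- inner while loop fused with the subsequent `alist[pos2]=None` write: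
-- scan for the first cell equal to `some c`; if found, blank it out.
def pvInner (c : Char) : List (Option Char) → Option (List (Option Char))
  | [] => none
  | x :: xs =>
    if x = some c then some (none :: xs)
    else
      match pvInner c xs with
      | some ys => some (x :: ys)
      | none => none

-- outer while loop over s1 with the `still_ok` early exit
def pvOuter : List Char → List (Option Char) → Bool
  | [], _ => true
  | c :: rest, alist =>
    match pvInner c alist with
    | some alist' => pvOuter rest alist'
    | none => false

def angram_sol (s1 : String) (s2 : String) : Bool :=
  pvOuter s1.toList (s2.toList.map some)

-- ===== PORT B =====
-- second loop of Source B: early-exit check/decrement over s1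
def pvCheck (cnt : PySem.Dict Char Int) : List Char → Bool
  | [] => true
  | c :: rest =>
    if cnt.getD c 0 = 0 then false
    else pvCheck (cnt.insert c (cnt.getD c 0 - 1)) rest

def angram_sol_alt (s1 : String) (s2 : String) : Bool :=
  pvCheck (s2.toList.foldl (fun d x => d.insert x (d.getD x 0 + 1)) PySem.Dict.empty)
    s1.toList

-- ===== PRECONDITION & SPEC =====
def Spec_angram_sol (s1 : String) (s2 : String) (out : Bool) : Prop := out = angram_sol_alt s1 s2
instance (s1 : String) (s2 : String) (out : Bool) : Decidable (Spec_angram_sol s1 s2 out) := by unfold Spec_angram_sol; infer_instance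

-- ===== CLAIM (what is proved, stated in full; the proofs are below) =====
def Claim_equal_angram_sol : Prop := ∀ (s1 : String) (s2 : String), Dom_angram_sol s1 s2 → Spec_angram_sol s1 s2 (angram_sol s1 s2)

-- ===== LEMMAS AND PROOFS =====

theorem pvInner_eq_none {c : Char} {l : List (Option Char)} :
    pvInner c l = none ↔ some c ∉ l := by
  induction l with
  | nil => simp [pvInner]
  | cons x xs ih =>
    by_cases h : x = some c
    · simp [pvInner, h]
    · cases hx : pvInner c xs with
      | none => simp [pvInner, h, hx, ih.mp hx, Ne.symm h]
      | some ys =>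
        simp only [pvInner, if_neg h, hx]
        simp only [List.mem_cons, not_or]
        constructor
        · intro hcontra; exact absurd hcontra (by simp)
        · intro ⟨_, hmem⟩; exact absurd (ih.mpr hmem) (by simp [hx])

theorem pvInner_count {c : Char} {l l' : List (Option Char)}
    (h : pvInner c l = some l') (d : Char) :
    (l'.count (some d) : Int) = l.count (some d) - (if d = c then 1 else 0) := by
  induction l generalizing l' with
  | nil => simp [pvInner] at h
  | cons x xs ih =>
    by_cases hx : x = some c
    · simp only [pvInner, if_pos hx] at h
      cases h
      subst hx
      by_cases hdc : d = c <;>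
        · simp [List.count_cons, hdc]
          try exact fun h => hdc h.symm
          try (push_cast; omega)
    · simp only [pvInner, if_neg hx] at h
      cases hys : pvInner c xs with
      | none => simp [hys] at h
      | some ys =>
        simp only [hys] at h
        cases h
        have := ih hys
        by_cases hxd : x = some d <;>
          · simp [hxd, this]
            try omega

theorem pvOuter_eq_pvCheck (l1 : List Char) (alist : List (Option Char))
    (cnt : PySem.Dict Char Int)
    (hinv : ∀ c : Char, (alist.count (some c) : Int) = cnt.getD c 0) :
    pvOuter l1 alist = pvCheck cnt l1 := by
  induction l1 generalizing alist cnt with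
  | nil => rfl
  | cons c rest ih =>
    by_cases hz : alist.count (some c) = 0
    · have hnotmem : some c ∉ alist := by
        simpa [List.count_eq_zero] using hz
      have hnone : pvInner c alist = none := pvInner_eq_none.mpr hnotmem
      have hg : cnt.getD c 0 = 0 := by rw [← hinv c, hz]; rfl
      simp [pvOuter, pvCheck, hnone, hg]
    · have hmem : some c ∈ alist := by
        by_contra hmm
        exact hz (List.count_eq_zero.mpr hmm)
      cases hsome : pvInner c alist with
      | none => exact absurd (pvInner_eq_none.mp hsome) (by simp [hmem])
      | some alist' =>
        have hg : cnt.getD c 0 ≠ 0 := by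
          rw [← hinv c]; exact_mod_cast hz
        simp only [pvOuter, hsome, pvCheck, if_neg hg]
        apply ih
        intro d
        have := pvInner_count hsome d
        rw [this, hinv d, PySem.Dict.getD_insert]
        by_cases hdc : d = c <;> simp [hdc]

-- ===== VERDICT =====
theorem angram_sol_spec : Claim_equal_angram_sol := by
  intro s1 s2 _
  unfold Spec_angram_sol angram_sol angram_sol_alt
  rw [PySem.Dict.foldl_insert_getD_add_one_eq_counter]
  apply pvOuter_eq_pvCheck
  intro c
  rw [PySem.Dict.getD_counter]
  norm_cast
  exact List.count_map_of_injective _ some (fun _ _ => Option.some.inj) c
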